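-- pv_equiv track=rewrite | github.com/shhuan1989/algorithms | codeforces/879C.py | transform
-- ===== SOURCE A (Python) =====
-- def transform(ops, x):
--     for op, v in ops:
--         if op == '&':
--             x &= v
--         elif op == '|':
--             x |= v
--         else:
--             x ^= v
--
--     return x
-- ===== SOURCE B (Python) =====
-- def transform(ops, x):
--     # Fold the ops into two x-independent accumulators: z = image of 0, o = image of ~0.
--     # Each result bit depends only on the corresponding input bit, so the answer is
--     # reconstructed in one step: bits where x is 1 come from o, bits where x is 0 from z.
--     z, o = 0, ~0
--     for op, v in ops:
--         if op == '&':
--             z &= v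
--             o &= v
--         elif op == '|':
--             z |= v
--             o |= v
--         else:
--             z ^= v
--             o ^= v
--     return (x & o) | (~x & z)
-- ===== Notes on version B (the rewrite author's own statement) =====
-- stated objective: alternative
-- what changed: Instead of threading x through the op sequence, B folds the ops into two x-independent accumulators z (image of 0) and o (image of ~0) and reconstructs the result per-bit as (x & o) | (~x & z); the fold no longer depends on x, so the per-bit transform is precomputed once.
import Mathlib
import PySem

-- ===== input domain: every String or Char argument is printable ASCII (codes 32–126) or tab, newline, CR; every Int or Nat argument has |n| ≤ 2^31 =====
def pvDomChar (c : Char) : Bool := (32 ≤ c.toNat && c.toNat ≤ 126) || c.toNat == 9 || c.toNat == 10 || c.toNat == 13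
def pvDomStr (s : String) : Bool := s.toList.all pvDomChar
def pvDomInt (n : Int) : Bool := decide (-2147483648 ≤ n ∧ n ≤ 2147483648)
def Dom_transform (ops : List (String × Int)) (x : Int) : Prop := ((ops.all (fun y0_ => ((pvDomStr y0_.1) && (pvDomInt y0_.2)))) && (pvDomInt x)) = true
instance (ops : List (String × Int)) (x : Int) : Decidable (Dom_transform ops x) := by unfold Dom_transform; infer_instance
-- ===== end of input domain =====

-- B folds the ops into two x-independent accumulators (images of 0 and ~0) and combines
-- them with x per-bit at the end, instead of threading x through the loop (objective: alternative).

-- ===== PORT A =====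
def transform (ops : List (String × Int)) (x : Int) : Int :=
  ops.foldl (fun acc p =>
    if p.1 = "&" then PySem.Int.band acc p.2
    else if p.1 = "|" then PySem.Int.bor acc p.2
    else PySem.Int.bxor acc p.2) x

-- ===== PORT B =====
def transform_alt (ops : List (String × Int)) (x : Int) : Int :=
  let zo := ops.foldl (fun (zo : Int × Int) p =>
    if p.1 = "&" then (PySem.Int.band zo.1 p.2, PySem.Int.band zo.2 p.2)
    else if p.1 = "|" then (PySem.Int.bor zo.1 p.2, PySem.Int.bor zo.2 p.2)
    else (PySem.Int.bxor zo.1 p.2, PySem.Int.bxor zo.2 p.2)) (0, Int.not 0)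
  PySem.Int.bor (PySem.Int.band x zo.2) (PySem.Int.band (Int.not x) zo.1)

-- ===== PRECONDITION & SPEC =====
def Spec_transform (ops : List (String × Int)) (x : Int) (out : Int) : Prop := out = transform_alt ops x
instance (ops : List (String × Int)) (x : Int) (out : Int) : Decidable (Spec_transform ops x out) := by unfold Spec_transform; infer_instance

-- ===== CLAIM (what is proved, stated in full; the proofs are below) =====
def Claim_equal_transform : Prop := ∀ (ops : List (String × Int)) (x : Int), Dom_transform ops x → Spec_transform ops x (transform ops x)

-- ===== LEMMAS AND PROOFS =====

-- disjoint Nat addition is bitwise or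
theorem pvNatAddEqOr : ∀ (m n : Nat), m &&& n = 0 → m + n = m ||| n := by
  intro m
  induction m using Nat.binaryRec with
  | zero => simp
  | bit a m ih =>
    intro n
    induction n using Nat.binaryRec with
    | zero => simp
    | bit b n _ =>
      intro h
      rw [Nat.land_bit, Nat.bit_eq_zero_iff] at h
      obtain ⟨hmn, hab⟩ := h
      have key := ih n hmn
      rw [Nat.lor_bit, Nat.bit_val, Nat.bit_val, Nat.bit_val]
      cases a <;> cases b <;>
        simp only [Bool.toNat_false, Bool.toNat_true, Bool.false_or, Bool.or_false,
          Bool.or_self, Bool.and_false, Bool.false_and, Bool.true_and] at hab ⊢ <;>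
        first | exact Bool.noConfusion hab | omega

theorem pvSubAndEqLdiff (m n : Nat) : m - (m &&& n) = Nat.ldiff m n := by
  have h1 : Nat.ldiff m n &&& (m &&& n) = 0 := by
    apply Nat.eq_of_testBit_eq
    intro k
    simp only [Nat.testBit_and, Nat.testBit_ldiff, Nat.zero_testBit]
    cases m.testBit k <;> cases n.testBit k <;> rfl
  have h2 : Nat.ldiff m n ||| (m &&& n) = m := by
    apply Nat.eq_of_testBit_eq
    intro k
    simp only [Nat.testBit_or, Nat.testBit_and, Nat.testBit_ldiff]
    cases m.testBit k <;> cases n.testBit k <;> rfl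
  have h3 := pvNatAddEqOr (Nat.ldiff m n) (m &&& n) h1
  omega

theorem pvTbCoe (m : Nat) (k : Nat) : (↑m : ℤ).testBit k = m.testBit k := rfl

theorem pvTbNegCoe (m : Nat) (k : Nat) : (-(↑m : ℤ) - 1).testBit k = !(m.testBit k) := by
  rw [show -(↑m : ℤ) - 1 = Int.negSucc m by rw [Int.negSucc_eq]; ring]
  rfl

theorem pvIntExt (a b : Int) (h : ∀ k, a.testBit k = b.testBit k) : a = b := by
  cases a with
  | ofNat m =>
    cases b with
    | ofNat n =>
      congr 1
      apply Nat.eq_of_testBit_eq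
      intro k; exact h k
    | negSucc n =>
      exfalso
      obtain ⟨k, hk1, hk2⟩ : ∃ k, m < 2 ^ k ∧ n < 2 ^ k :=
        ⟨m + n + 1, by have := Nat.lt_two_pow_self (n := m + n + 1); omega,
          by have := Nat.lt_two_pow_self (n := m + n + 1); omega⟩
      have h1 : (Int.ofNat m).testBit k = m.testBit k := rfl
      have h2 : (Int.negSucc n).testBit k = !(n.testBit k) := rfl
      have hh := h k
      rw [h1, h2, Nat.testBit_eq_false_of_lt hk1, Nat.testBit_eq_false_of_lt hk2] at hh
      simp at hh
  | negSucc m =>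
    cases b with
    | ofNat n =>
      exfalso
      obtain ⟨k, hk1, hk2⟩ : ∃ k, m < 2 ^ k ∧ n < 2 ^ k :=
        ⟨m + n + 1, by have := Nat.lt_two_pow_self (n := m + n + 1); omega,
          by have := Nat.lt_two_pow_self (n := m + n + 1); omega⟩
      have := h k
      simp only [Int.testBit] at this
      rw [Nat.testBit_eq_false_of_lt hk1, Nat.testBit_eq_false_of_lt hk2] at this
      simp at this
    | negSucc n =>
      congr 1
      apply Nat.eq_of_testBit_eq
      intro k
      have := h k
      simp only [Int.testBit] at this
      simpa using this

theorem pvTbBand (a b : Int) (k : Nat) :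
    (PySem.Int.band a b).testBit k = (a.testBit k && b.testBit k) := by
  cases a with
  | ofNat m =>
    cases b with
    | ofNat n =>
      simp only [PySem.Int.band, Int.ofNat_eq_natCast, Int.natCast_nonneg, if_true,
        Int.toNat_natCast, pvTbCoe, Nat.testBit_and]
    | negSucc n =>
      have hb : ¬ (0 : ℤ) ≤ Int.negSucc n := by simp [Int.negSucc_eq]; omega
      have hc : (-(Int.negSucc n) - 1).toNat = n := by rw [Int.negSucc_eq]; omega
      simp only [PySem.Int.band, Int.ofNat_eq_natCast, Int.natCast_nonneg, if_true, hb, if_false,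
        Int.toNat_natCast, hc, pvSubAndEqLdiff, pvTbCoe, Nat.testBit_ldiff]
      rw [show (Int.negSucc n) = -(↑n : ℤ) - 1 by rw [Int.negSucc_eq]; ring, pvTbNegCoe]
  | negSucc m =>
    have ha : ¬ (0 : ℤ) ≤ Int.negSucc m := by simp [Int.negSucc_eq]; omega
    have hca : (-(Int.negSucc m) - 1).toNat = m := by rw [Int.negSucc_eq]; omega
    cases b with
    | ofNat n =>
      simp only [PySem.Int.band, ha, if_false, Int.ofNat_eq_natCast, Int.natCast_nonneg, if_true,
        Int.toNat_natCast, hca, pvSubAndEqLdiff, pvTbCoe, Nat.testBit_ldiff]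
      rw [show (Int.negSucc m) = -(↑m : ℤ) - 1 by rw [Int.negSucc_eq]; ring, pvTbNegCoe]
      cases m.testBit k <;> cases n.testBit k <;> rfl
    | negSucc n =>
      have hb : ¬ (0 : ℤ) ≤ Int.negSucc n := by simp [Int.negSucc_eq]; omega
      have hcb : (-(Int.negSucc n) - 1).toNat = n := by rw [Int.negSucc_eq]; omega
      simp only [PySem.Int.band, ha, hb, if_false, hca, hcb, pvTbNegCoe, Nat.testBit_or]
      rw [show (Int.negSucc m) = -(↑m : ℤ) - 1 by rw [Int.negSucc_eq]; ring,
          show (Int.negSucc n) = -(↑n : ℤ) - 1 by rw [Int.negSucc_eq]; ring,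
          pvTbNegCoe, pvTbNegCoe]
      cases m.testBit k <;> cases n.testBit k <;> rfl

theorem pvTbBor (a b : Int) (k : Nat) :
    (PySem.Int.bor a b).testBit k = (a.testBit k || b.testBit k) := by
  cases a with
  | ofNat m =>
    cases b with
    | ofNat n =>
      simp only [PySem.Int.bor, Int.ofNat_eq_natCast, Int.natCast_nonneg, if_true,
        Int.toNat_natCast, pvTbCoe, Nat.testBit_or]
    | negSucc n =>
      have hb : ¬ (0 : ℤ) ≤ Int.negSucc n := by simp [Int.negSucc_eq]; omega
      have hc : (-(Int.negSucc n) - 1).toNat = n := by rw [Int.negSucc_eq]; omega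
      simp only [PySem.Int.bor, Int.ofNat_eq_natCast, Int.natCast_nonneg, if_true, hb, if_false,
        Int.toNat_natCast, hc, pvSubAndEqLdiff, pvTbNegCoe, pvTbCoe, Nat.testBit_ldiff]
      rw [show (Int.negSucc n) = -(↑n : ℤ) - 1 by rw [Int.negSucc_eq]; ring, pvTbNegCoe]
      cases m.testBit k <;> cases n.testBit k <;> rfl
  | negSucc m =>
    have ha : ¬ (0 : ℤ) ≤ Int.negSucc m := by simp [Int.negSucc_eq]; omega
    have hca : (-(Int.negSucc m) - 1).toNat = m := by rw [Int.negSucc_eq]; omega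
    cases b with
    | ofNat n =>
      simp only [PySem.Int.bor, ha, if_false, Int.ofNat_eq_natCast, Int.natCast_nonneg, if_true,
        Int.toNat_natCast, hca, pvSubAndEqLdiff, pvTbNegCoe, pvTbCoe, Nat.testBit_ldiff]
      rw [show (Int.negSucc m) = -(↑m : ℤ) - 1 by rw [Int.negSucc_eq]; ring, pvTbNegCoe]
      cases m.testBit k <;> cases n.testBit k <;> rfl
    | negSucc n =>
      have hb : ¬ (0 : ℤ) ≤ Int.negSucc n := by simp [Int.negSucc_eq]; omega
      have hcb : (-(Int.negSucc n) - 1).toNat = n := by rw [Int.negSucc_eq]; omega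
      simp only [PySem.Int.bor, ha, hb, if_false, hca, hcb, pvTbNegCoe, Nat.testBit_and]
      rw [show (Int.negSucc m) = -(↑m : ℤ) - 1 by rw [Int.negSucc_eq]; ring,
          show (Int.negSucc n) = -(↑n : ℤ) - 1 by rw [Int.negSucc_eq]; ring,
          pvTbNegCoe, pvTbNegCoe]
      cases m.testBit k <;> cases n.testBit k <;> rfl

theorem pvTbBxor (a b : Int) (k : Nat) :
    (PySem.Int.bxor a b).testBit k = (a.testBit k ^^ b.testBit k) := by
  cases a with
  | ofNat m =>
    cases b with
    | ofNat n =>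
      simp only [PySem.Int.bxor, Int.ofNat_eq_natCast, Int.natCast_nonneg, if_true,
        Int.toNat_natCast, pvTbCoe, Nat.testBit_xor]
    | negSucc n =>
      have hb : ¬ (0 : ℤ) ≤ Int.negSucc n := by simp [Int.negSucc_eq]; omega
      have hc : (-(Int.negSucc n) - 1).toNat = n := by rw [Int.negSucc_eq]; omega
      simp only [PySem.Int.bxor, Int.ofNat_eq_natCast, Int.natCast_nonneg, if_true, hb, if_false,
        Int.toNat_natCast, hc, pvTbNegCoe, pvTbCoe, Nat.testBit_xor]
      rw [show (Int.negSucc n) = -(↑n : ℤ) - 1 by rw [Int.negSucc_eq]; ring, pvTbNegCoe]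
      cases m.testBit k <;> cases n.testBit k <;> rfl
  | negSucc m =>
    have ha : ¬ (0 : ℤ) ≤ Int.negSucc m := by simp [Int.negSucc_eq]; omega
    have hca : (-(Int.negSucc m) - 1).toNat = m := by rw [Int.negSucc_eq]; omega
    cases b with
    | ofNat n =>
      simp only [PySem.Int.bxor, ha, if_false, Int.ofNat_eq_natCast, Int.natCast_nonneg, if_true,
        Int.toNat_natCast, hca, pvTbNegCoe, pvTbCoe, Nat.testBit_xor]
      rw [show (Int.negSucc m) = -(↑m : ℤ) - 1 by rw [Int.negSucc_eq]; ring, pvTbNegCoe]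
      cases m.testBit k <;> cases n.testBit k <;> rfl
    | negSucc n =>
      have hb : ¬ (0 : ℤ) ≤ Int.negSucc n := by simp [Int.negSucc_eq]; omega
      have hcb : (-(Int.negSucc n) - 1).toNat = n := by rw [Int.negSucc_eq]; omega
      simp only [PySem.Int.bxor, ha, hb, if_false, hca, hcb, pvTbCoe, Nat.testBit_xor]
      rw [show (Int.negSucc m) = -(↑m : ℤ) - 1 by rw [Int.negSucc_eq]; ring,
          show (Int.negSucc n) = -(↑n : ℤ) - 1 by rw [Int.negSucc_eq]; ring,
          pvTbNegCoe, pvTbNegCoe]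
      cases m.testBit k <;> cases n.testBit k <;> rfl

theorem pvTbNot (a : Int) (k : Nat) : (Int.not a).testBit k = !(a.testBit k) := by
  cases a with
  | ofNat m =>
    rw [show Int.not (Int.ofNat m) = Int.negSucc m from rfl]
    rw [show (Int.negSucc m).testBit k = !(m.testBit k) from rfl,
        show (Int.ofNat m).testBit k = m.testBit k from rfl]
  | negSucc m =>
    rw [show Int.not (Int.negSucc m) = Int.ofNat m from rfl]
    rw [show (Int.negSucc m).testBit k = !(m.testBit k) from rfl,
        show (Int.ofNat m).testBit k = m.testBit k from rfl]
    simp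

-- the per-bit combine
def pvCombine (x z o : Int) : Int :=
  PySem.Int.bor (PySem.Int.band x o) (PySem.Int.band (Int.not x) z)

theorem pvTbZero (k : Nat) : (0 : ℤ).testBit k = false := by
  rw [show (0 : ℤ) = ((0 : Nat) : ℤ) by rfl, pvTbCoe, Nat.zero_testBit]

theorem pvCombine_id (x : Int) : pvCombine x 0 (Int.not 0) = x := by
  apply pvIntExt
  intro k
  simp only [pvCombine, pvTbBor, pvTbBand, pvTbNot, pvTbZero]
  cases x.testBit k <;> rfl

theorem pvCombine_band (x z o v : Int) :
    pvCombine x (PySem.Int.band z v) (PySem.Int.band o v) = PySem.Int.band (pvCombine x z o) v := by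
  apply pvIntExt
  intro k
  simp only [pvCombine, pvTbBor, pvTbBand, pvTbNot]
  cases x.testBit k <;> cases z.testBit k <;> cases o.testBit k <;> cases v.testBit k <;> rfl

theorem pvCombine_bor (x z o v : Int) :
    pvCombine x (PySem.Int.bor z v) (PySem.Int.bor o v) = PySem.Int.bor (pvCombine x z o) v := by
  apply pvIntExt
  intro k
  simp only [pvCombine, pvTbBor, pvTbBand, pvTbNot]
  cases x.testBit k <;> cases z.testBit k <;> cases o.testBit k <;> cases v.testBit k <;> rfl

theorem pvCombine_bxor (x z o v : Int) :
    pvCombine x (PySem.Int.bxor z v) (PySem.Int.bxor o v) = PySem.Int.bxor (pvCombine x z o) v := by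
  apply pvIntExt
  intro k
  simp only [pvCombine, pvTbBor, pvTbBand, pvTbBxor, pvTbNot]
  cases x.testBit k <;> cases z.testBit k <;> cases o.testBit k <;> cases v.testBit k <;> rfl

theorem pvFoldAgree (ops : List (String × Int)) (x z o : Int) :
    ops.foldl (fun acc p =>
      if p.1 = "&" then PySem.Int.band acc p.2
      else if p.1 = "|" then PySem.Int.bor acc p.2
      else PySem.Int.bxor acc p.2) (pvCombine x z o) =
    (fun zo : Int × Int => pvCombine x zo.1 zo.2)
      (ops.foldl (fun (zo : Int × Int) p =>
        if p.1 = "&" then (PySem.Int.band zo.1 p.2, PySem.Int.band zo.2 p.2)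
        else if p.1 = "|" then (PySem.Int.bor zo.1 p.2, PySem.Int.bor zo.2 p.2)
        else (PySem.Int.bxor zo.1 p.2, PySem.Int.bxor zo.2 p.2)) (z, o)) := by
  induction ops generalizing z o with
  | nil => rfl
  | cons p ops ih =>
    simp only [List.foldl_cons]
    split_ifs with h1 h2
    · rw [← pvCombine_band]; exact ih _ _
    · rw [← pvCombine_bor]; exact ih _ _
    · rw [← pvCombine_bxor]; exact ih _ _

-- ===== VERDICT (by name: the statement is the Claim_ definition above) =====
theorem transform_spec : Claim_equal_transform := by
  intro ops x _
  unfold Spec_transform transform transform_alt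
  have := pvFoldAgree ops x 0 (Int.not 0)
  rw [pvCombine_id] at this
  simpa [pvCombine] using this
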